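-- pv_equiv track=rewrite | github.com/waytothevenus/Stablecoin_price_engine | app/utils/exchanges.py | select_best_trading_pair
-- ===== SOURCE A (Python) =====
-- def select_best_trading_pair(symbol, trading_pairs):
--     preferred_pairs = ["USDT", "BUSD", "BTC", "ETH", "USDC"]
--
--     # First, try to find a trading pair that matches the preferred pairs
--     for pair in preferred_pairs:
--         for trading_pair in trading_pairs:
--             if trading_pair.startswith(symbol) and trading_pair.endswith(pair):
--                 return trading_pair
--
--     # If no preferred pair is found, return the first trading pair that starts with the symbol
--     for trading_pair in trading_pairs:
--         if trading_pair.startswith(symbol):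
--             return trading_pair
--     for trading_pair in trading_pairs:
--         if trading_pair.endswith(symbol):
--             return trading_pair
--     for trading_pair in trading_pairs:
--         if trading_pair.find(symbol) != -1:
--             return trading_pair
--
--     return None  # No suitable trading pair found
-- ===== SOURCE B (Python) =====
-- def select_best_trading_pair(symbol, trading_pairs):
--     preferred = ["USDT", "BUSD", "BTC", "ETH", "USDC"]
--     best_pref = None   # (preferred_index, trading_pair), smallest index wins, earliest position breaks ties
--     first_sw = None
--     first_ew = None
--     first_ct = None
--     for tp in trading_pairs:
--         if tp.startswith(symbol):
--             if first_sw is None: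
--                 first_sw = tp
--             for j, p in enumerate(preferred):
--                 if tp.endswith(p):
--                     if best_pref is None or j < best_pref[0]:
--                         best_pref = (j, tp)
--                     break
--         if first_ew is None and tp.endswith(symbol):
--             first_ew = tp
--         if first_ct is None and symbol in tp:
--             first_ct = tp
--     if best_pref is not None:
--         return best_pref[1]
--     if first_sw is not None:
--         return first_sw
--     if first_ew is not None:
--         return first_ew
--     return first_ct
-- ===== Notes on version B (the rewrite author's own statement) =====
-- stated objective: faster
-- what changed: One pass over trading_pairs maintaining four candidates (best preferred suffix by (index, position), first startswith, first endswith, first containing) instead of A's up-to-eight scans of the list.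
import Mathlib
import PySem

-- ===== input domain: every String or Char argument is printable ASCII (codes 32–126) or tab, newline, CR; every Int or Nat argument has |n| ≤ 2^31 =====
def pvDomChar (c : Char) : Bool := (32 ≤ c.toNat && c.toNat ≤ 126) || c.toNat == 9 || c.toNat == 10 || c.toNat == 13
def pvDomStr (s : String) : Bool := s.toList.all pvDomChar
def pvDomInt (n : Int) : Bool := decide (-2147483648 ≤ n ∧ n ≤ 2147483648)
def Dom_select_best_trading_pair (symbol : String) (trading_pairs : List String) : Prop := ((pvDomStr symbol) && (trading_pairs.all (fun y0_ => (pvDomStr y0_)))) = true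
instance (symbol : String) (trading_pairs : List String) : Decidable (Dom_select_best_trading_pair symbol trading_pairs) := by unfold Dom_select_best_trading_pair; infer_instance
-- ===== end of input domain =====

-- B replaces A's nested preferred-pair loop plus three fallback scans with a single pass
-- maintaining four candidates; return value proved equal on all inputs.

-- ===== PORT A =====
def pref_list : List String := ["USDT", "BUSD", "BTC", "ETH", "USDC"]

def select_best_trading_pair (symbol : String) (trading_pairs : List String) : Option String :=
  -- 'for pair in preferred_pairs: for trading_pair in trading_pairs: if …: return' = findSome?/find?
  match pref_list.findSome? (fun pair =>
      trading_pairs.find? (fun tp => PySem.Str.startswith tp symbol && PySem.Str.endswith tp pair)) with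
  | some tp => some tp
  | none =>
    match trading_pairs.find? (fun tp => PySem.Str.startswith tp symbol) with
    | some tp => some tp
    | none =>
      match trading_pairs.find? (fun tp => PySem.Str.endswith tp symbol) with
      | some tp => some tp
      | none =>
        match trading_pairs.find? (fun tp => PySem.Str.find tp symbol != -1) with
        | some tp => some tp
        | none => none

-- ===== PORT B =====
def preferred_alt : List String := ["USDT", "BUSD", "BTC", "ETH", "USDC"]

-- one loop iteration of Source B: update (best_pref, first_sw, first_ew, first_ct)
def sbtpStep (symbol : String)
    (s : Option (Nat × String) × Option String × Option String × Option String) (tp : String) :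
    Option (Nat × String) × Option String × Option String × Option String :=
  let (bp, fsw, few, fct) := s
  let (bp, fsw) :=
    if PySem.Str.startswith tp symbol then
      let fsw := if fsw.isNone then some tp else fsw
      let bp :=
        -- 'for j, p in enumerate(preferred): if tp.endswith(p): …; break' = findIdx?
        match preferred_alt.findIdx? (fun p => PySem.Str.endswith tp p) with
        | none => bp
        | some j =>
          match bp with
          | none => some (j, tp)
          | some (k, t) => if j < k then some (j, tp) else some (k, t)
      (bp, fsw)
    else (bp, fsw)
  let few := if few.isNone && PySem.Str.endswith tp symbol then some tp else few
  let fct := if fct.isNone && PySem.Str.isIn symbol tp then some tp else fct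
  (bp, fsw, few, fct)

def select_best_trading_pair_alt (symbol : String) (trading_pairs : List String) : Option String :=
  match trading_pairs.foldl (sbtpStep symbol) (none, none, none, none) with
  | (some (_, t), _, _, _) => some t
  | (none, some t, _, _) => some t
  | (none, none, some t, _) => some t
  | (none, none, none, fct) => fct

-- ===== PRECONDITION & SPEC =====
def Spec_select_best_trading_pair (symbol : String) (trading_pairs : List String) (out : Option String) : Prop := out = select_best_trading_pair_alt symbol trading_pairs
instance (symbol : String) (trading_pairs : List String) (out : Option String) : Decidable (Spec_select_best_trading_pair symbol trading_pairs out) := by unfold Spec_select_best_trading_pair; infer_instance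

-- ===== CLAIM (what is proved, stated in full; the proofs are below) =====
def Claim_equal_select_best_trading_pair : Prop := ∀ (symbol : String) (trading_pairs : List String), Dom_select_best_trading_pair symbol trading_pairs → Spec_select_best_trading_pair symbol trading_pairs (select_best_trading_pair symbol trading_pairs)

-- ===== LEMMAS AND PROOFS =====

-- abstract description of B's best_pref candidate: smallest preferred index (offset i) whose
-- pattern has a match in xs, paired with the first such match (sw, f kept abstract)
def genPick (sw : String → Bool) (f : String → String → Bool) (i : Nat) (ps xs : List String) :
    Option (Nat × String) :=
  match ps with
  | [] => none
  | p :: ps' =>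
    match xs.find? (fun tp => sw tp && f tp p) with
    | some t => some (i, t)
    | none => genPick sw f (i + 1) ps' xs

lemma genPick_ge (sw : String → Bool) (f : String → String → Bool) (ps xs : List String) :
    ∀ i k t, genPick sw f i ps xs = some (k, t) → i ≤ k := by
  induction ps with
  | nil => intro i k t h; simp [genPick] at h
  | cons p ps ih =>
    intro i k t h
    unfold genPick at h
    cases hf : xs.find? (fun tp => sw tp && f tp p) with
    | some u => rw [hf] at h; simp at h; omega
    | none => rw [hf] at h; have := ih (i + 1) k t h; omega

lemma findSome_eq_genPick (sw : String → Bool) (f : String → String → Bool)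
    (ps xs : List String) (i : Nat) :
    ps.findSome? (fun p => xs.find? (fun tp => sw tp && f tp p))
      = (genPick sw f i ps xs).map Prod.snd := by
  induction ps generalizing i with
  | nil => simp [genPick]
  | cons p ps ih =>
    unfold genPick
    cases hf : xs.find? (fun tp => sw tp && f tp p) with
    | some t => simp [hf]
    | none => simp [hf, ih (i + 1)]

lemma find?_append_single {α : Type} (p : α → Bool) (xs : List α) (x : α) :
    (xs ++ [x]).find? p = ((xs.find? p).or (if p x then some x else none)) := by
  rw [List.find?_append]
  congr 1
  simp [List.find?_singleton]

lemma genPick_append_pos (sw : String → Bool) (f : String → String → Bool) (x : String)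
    (hx : sw x = true) (ps : List String) :
    ∀ i xs, genPick sw f i ps (xs ++ [x]) =
      match ps.findIdx? (fun p => f x p) with
      | none => genPick sw f i ps xs
      | some j =>
        match genPick sw f i ps xs with
        | none => some (i + j, x)
        | some (k, t) => if i + j < k then some (i + j, x) else some (k, t) := by
  induction ps with
  | nil => intro i xs; simp [genPick]
  | cons p ps ih =>
    intro i xs
    have hfind : (xs ++ [x]).find? (fun tp => sw tp && f tp p)
        = ((xs.find? (fun tp => sw tp && f tp p)).or (if f x p then some x else none)) := by
      rw [find?_append_single]
      simp only [hx, Bool.true_and]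
    unfold genPick
    rw [hfind]
    cases he : f x p with
    | true =>
      have hidx : (p :: ps).findIdx? (fun q => f x q) = some 0 := by
        simp [List.findIdx?_cons, he]
      cases hf : xs.find? (fun tp => sw tp && f tp p) with
      | some t =>
        simp [hidx]
      | none =>
        cases hg : genPick sw f (i + 1) ps xs with
        | none => simp [hidx]
        | some kt =>
          obtain ⟨k, t⟩ := kt
          have hk := genPick_ge sw f ps xs (i + 1) k t hg
          simp [hidx]
          exact fun h => absurd h (by omega)
    | false =>
      have hidx : (p :: ps).findIdx? (fun q => f x q)
          = (ps.findIdx? (fun q => f x q)).map (· + 1) := by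
        simp [List.findIdx?_cons, he]
      cases hf : xs.find? (fun tp => sw tp && f tp p) with
      | some t =>
        cases hj : ps.findIdx? (fun q => f x q) with
        | none => simp [hidx, hj]
        | some j =>
          have hni : ¬ i + (j + 1) < i := by omega
          simp [hidx, hj, hni]
      | none =>
        cases hj : ps.findIdx? (fun q => f x q) with
        | none => simp [hidx, hj, ih (i + 1) xs]
        | some j =>
          have harith : i + (j + 1) = i + 1 + j := by omega
          simp [hidx, hj, ih (i + 1) xs, harith]

lemma genPick_append_neg (sw : String → Bool) (f : String → String → Bool) (x : String)
    (hx : sw x = false) (ps : List String) :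
    ∀ i xs, genPick sw f i ps (xs ++ [x]) = genPick sw f i ps xs := by
  induction ps with
  | nil => intro i xs; simp [genPick]
  | cons p ps ih =>
    intro i xs
    unfold genPick
    rw [find?_append_single]
    simp only [hx, Bool.false_and, if_neg Bool.false_ne_true, Option.or_none]
    cases xs.find? (fun tp => sw tp && f tp p) with
    | some t => rfl
    | none => exact ih (i + 1) xs

lemma foldl_invariant (symbol : String) (xs : List String) :
    xs.foldl (sbtpStep symbol) (none, none, none, none) =
      (genPick (fun tp => PySem.Str.startswith tp symbol) (fun tp p => PySem.Str.endswith tp p)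
        0 pref_list xs,
       xs.find? (fun tp => PySem.Str.startswith tp symbol),
       xs.find? (fun tp => PySem.Str.endswith tp symbol),
       xs.find? (fun tp => PySem.Str.isIn symbol tp)) := by
  induction xs using List.reverseRecOn with
  | nil => simp [genPick, pref_list, preferred_alt]
  | append_singleton xs x ih =>
    rw [List.foldl_append, ih]
    simp only [List.foldl_cons, List.foldl_nil]
    rw [find?_append_single, find?_append_single, find?_append_single]
    unfold sbtpStep
    cases hx : PySem.Str.startswith x symbol with
    | false =>
      rw [genPick_append_neg (fun tp => PySem.Str.startswith tp symbol)
            (fun tp p => PySem.Str.endswith tp p) x hx pref_list 0 xs]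
      cases hsw : xs.find? (fun tp => PySem.Str.startswith tp symbol) <;>
      cases hew : xs.find? (fun tp => PySem.Str.endswith tp symbol) <;>
      cases hct : xs.find? (fun tp => PySem.Str.isIn symbol tp) <;>
        simp [pref_list, preferred_alt]
    | true =>
      rw [genPick_append_pos (fun tp => PySem.Str.startswith tp symbol)
            (fun tp p => PySem.Str.endswith tp p) x hx pref_list 0 xs]
      cases hsw : xs.find? (fun tp => PySem.Str.startswith tp symbol) <;>
      cases hew : xs.find? (fun tp => PySem.Str.endswith tp symbol) <;>
      cases hct : xs.find? (fun tp => PySem.Str.isIn symbol tp) <;>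
        simp [pref_list, preferred_alt]

lemma find_bne_eq_isIn (symbol tp : String) :
    (PySem.Str.find tp symbol != -1) = PySem.Str.isIn symbol tp := by
  cases h : PySem.Str.isIn symbol tp with
  | true =>
    have h1 := (PySem.Str.isIn_iff_infix symbol tp).mp h
    have h2 := (PySem.Str.find_ne_neg_one_iff tp symbol).mpr h1
    simpa using h2
  | false =>
    have h1 : ¬ symbol.toList <:+: tp.toList := by
      intro hc
      rw [(PySem.Str.isIn_iff_infix symbol tp).mpr hc] at h
      simp at h
    have h2 := (PySem.Str.find_eq_neg_one_iff tp symbol).mpr h1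
    simpa using h2

-- ===== VERDICT (by name: the statement is the Claim_ definition above) =====
theorem select_best_trading_pair_spec : Claim_equal_select_best_trading_pair := by
  intro symbol trading_pairs _
  unfold Spec_select_best_trading_pair select_best_trading_pair select_best_trading_pair_alt
  rw [foldl_invariant]
  rw [show pref_list.findSome? (fun pair =>
        trading_pairs.find? (fun tp => PySem.Str.startswith tp symbol && PySem.Str.endswith tp pair))
      = (genPick (fun tp => PySem.Str.startswith tp symbol) (fun tp p => PySem.Str.endswith tp p)
          0 pref_list trading_pairs).map Prod.snd from
    findSome_eq_genPick _ _ pref_list trading_pairs 0]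
  have hct : (fun tp => PySem.Str.find tp symbol != -1)
      = (fun tp => PySem.Str.isIn symbol tp) := funext fun tp => find_bne_eq_isIn symbol tp
  rw [hct]
  cases genPick (fun tp => PySem.Str.startswith tp symbol) (fun tp p => PySem.Str.endswith tp p)
      0 pref_list trading_pairs with
  | some kt => obtain ⟨k, t⟩ := kt; simp
  | none =>
    simp only [Option.map_none]
    cases trading_pairs.find? (fun tp => PySem.Str.startswith tp symbol) with
    | some t => simp
    | none =>
      cases trading_pairs.find? (fun tp => PySem.Str.endswith tp symbol) with
      | some t => simp
      | none =>
        cases trading_pairs.find? (fun tp => PySem.Str.isIn symbol tp) <;> simp
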